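-- pv_equiv track=rewrite | github.com/tomeldridge90/portfolio | Python Challenges/PrimeNumberAlgorithm.py | only_oddDigPrimes
-- ===== SOURCE A (Python) =====
-- import math
--
-- def only_oddDigPrimes (n):
--     numPurePrime = 0
--     lastPurePrime = 0
--     nearestPurePrime=0
--     for i in range (3,n,2):
--         isPrime = 0
--         numberOfFactors = 0
--         for e in range(1,int(math.sqrt(i))+1):
--             if i%e ==0:
--                 numberOfFactors+=1
--         if numberOfFactors <2:
--             isPrime = 1
--         lst = list(str(i))
--         for num in lst:
--             if int(num) %2 ==0:
--                 isPrime =0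
--                 break
--         if isPrime ==1:
--             numPurePrime+=1
--             lastPurePrime=i
--     for i in range(n,99999999):
--         if i %2 ==0:
--             continue
--         isPrime = 0
--         numberOfFactors = 0
--         for e in range(1,int(math.sqrt(i))+1):
--             if i%e ==0:
--                 numberOfFactors+=1
--         if numberOfFactors <2:
--             isPrime = 1
--         lst = list(str(i))
--         for num in lst:
--             if int(num) %2 ==0:
--                 isPrime =0
--                 break
--         if isPrime ==1:
--             nearestPurePrime = i
--             break
--     return [numPurePrime,lastPurePrime,nearestPurePrime]
-- ===== SOURCE B (Python) =====
-- import math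
--
--
-- def _is_prime_odd(i):
--     # primality for odd i >= 3: trial division by odd candidates up to sqrt(i)
--     if i < 2:
--         return False
--     d = 3
--     while d * d <= i:
--         if i % d == 0:
--             return False
--         d += 2
--     return True
--
--
-- def only_oddDigPrimes(n):
--     # Sieve of Eratosthenes below n, then scan it once with the odd-digit filter;
--     # upward search by trial division with the digit filter first.
--     m = n if n > 0 else 0
--     sieve = [True] * m
--     for i in range(min(m, 2)):
--         sieve[i] = False
--     for p in range(2, m):
--         for q in range(2 * p, m, p):
--             sieve[q] = False
--     num = 0
--     last = 0
--     for i in range(m):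
--         if sieve[i] and all(int(d) % 2 == 1 for d in str(i)):
--             num += 1
--             last = i
--     i = n if n % 2 == 1 else n + 1
--     if i < 3:
--         i = 3
--     nearest = 0
--     while i < 99999999:
--         if all(int(d) % 2 == 1 for d in str(i)) and _is_prime_odd(i):
--             nearest = i
--             break
--         i += 2
--     return [num, last, nearest]
-- ===== Notes on version B (the rewrite author's own statement) =====
-- stated objective: faster
-- what changed: Replaces per-number divisor counting (trial division over every e up to sqrt(i) for every odd i below n) by one sieve over [0,n) scanned once with the digit filter, and the upward search uses the cheap digit filter first plus odd-step trial division with early exit.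
-- intended difference: For n in {0,1} A returns [0,0,1] because its divisor-count test wrongly classifies 1 (whose only counted divisor is 1) as prime, so the upward search stops at 1; B returns [0,0,3], the nearest genuine all-odd-digit prime, which is the intended value since 1 is not prime. — e.g. on only_oddDigPrimes(0): A returns [0, 0, 1], B returns [0, 0, 3]
import Mathlib
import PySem

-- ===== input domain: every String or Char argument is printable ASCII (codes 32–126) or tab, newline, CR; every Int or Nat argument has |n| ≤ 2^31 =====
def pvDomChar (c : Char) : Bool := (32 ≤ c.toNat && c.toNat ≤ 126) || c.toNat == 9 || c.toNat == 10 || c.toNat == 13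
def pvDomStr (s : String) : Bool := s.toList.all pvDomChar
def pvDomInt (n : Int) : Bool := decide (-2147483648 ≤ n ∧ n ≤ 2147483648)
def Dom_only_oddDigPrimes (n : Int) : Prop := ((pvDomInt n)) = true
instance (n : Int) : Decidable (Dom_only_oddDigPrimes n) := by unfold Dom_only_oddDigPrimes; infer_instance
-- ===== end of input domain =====

-- B replaces A's per-number divisor counting by one sieve over [0,n) plus a digit-filter-first
-- upward search with early-exit odd trial division (objective: faster).


-- ===== PORT A =====
-- int(math.sqrt(i)) ported as Nat.sqrt: exact for 0 ≤ i ≤ 2^31 (CPython's correctly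
-- rounded double sqrt, truncated, is the integer square root in that range)
def aSqrtInt (i : Int) : Int := (Nat.sqrt i.toNat : Int)

-- 'for e in range(1, int(math.sqrt(i)) + 1): if i % e == 0: numberOfFactors += 1'
def aCountFactors (i : Int) : Int :=
  (PySem.List.pyRange 1 (aSqrtInt i + 1)).foldl
    (fun acc e => if PySem.Int.mod i e == 0 then acc + 1 else acc) 0

-- 'for num in lst: if int(num) % 2 == 0: isPrime = 0; break'
-- int(c) of a digit char is its code minus 48 (exact here: str(i) with i ≥ 0 has only digit chars)
def aDigitLoop : List Char → Int → Int
  | [], isPrime => isPrime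
  | c :: cs, isPrime =>
      if PySem.Int.mod ((c.toNat : Int) - 48) 2 == 0 then 0 else aDigitLoop cs isPrime

-- the shared body of A's two loops: the value of 'isPrime' after the factor count and digit scan
def aIsPure (i : Int) : Bool :=
  aDigitLoop (PySem.Int.toStr i).toList (if aCountFactors i < 2 then 1 else 0) == 1

-- 'for i in range(3, n, 2)' accumulating (numPurePrime, lastPurePrime)
def aLoop1 (n : Int) : Int × Int :=
  (PySem.List.pyRange 3 n 2).foldl
    (fun s i => if aIsPure i then (s.1 + 1, i) else s) (0, 0)

-- 'for i in range(n, 99999999)' with the even-number 'continue' and the 'break';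
-- fuel = number of remaining range elements, 0 when the range is exhausted (returns the initial 0)
def aLoop2 : Nat → Int → Int
  | 0, _ => 0
  | fuel + 1, i =>
      if PySem.Int.mod i 2 == 0 then aLoop2 fuel (i + 1)
      else if aIsPure i then i else aLoop2 fuel (i + 1)

def only_oddDigPrimes (n : Int) : List Int :=
  let s := aLoop1 n
  [s.1, s.2, aLoop2 (99999999 - n).toNat n]

-- ===== PORT B =====
-- 'for q in range(2 * p, m, p): sieve[q] = False'
def bMark (m : Int) (s : Array Bool) (p : Int) : Array Bool :=
  (PySem.List.pyRange (2 * p) m p).foldl (fun s q => s.set! q.toNat false) s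

-- sieve = [True] * m; sieve[0] = sieve[1] = False (guarded by min(m, 2)); cross out multiples
def bSieve (m : Int) : Array Bool :=
  let s := Array.replicate m.toNat true
  let s := (PySem.List.pyRange 0 (min m 2)).foldl (fun s i => s.set! i.toNat false) s
  (PySem.List.pyRange 2 m).foldl (bMark m) s

-- all(int(d) % 2 == 1 for d in str(i))
def bDigitsOdd (i : Int) : Bool :=
  (PySem.Int.toStr i).toList.all (fun c => PySem.Int.mod ((c.toNat : Int) - 48) 2 == 1)

-- 'while d * d <= i: …; d += 2'; fuel bounds the number of iterations
def bTrial : Nat → Int → Int → Bool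
  | 0, _, _ => true
  | fuel + 1, i, d =>
      if d * d ≤ i then
        if PySem.Int.mod i d == 0 then false else bTrial fuel i (d + 2)
      else true

def bIsPrimeOdd (i : Int) : Bool :=
  if i < 2 then false else bTrial i.toNat i 3

-- 'for i in range(m): if sieve[i] and all(...): num += 1; last = i'
def bScan (m : Int) (s : Array Bool) : Int × Int :=
  (PySem.List.pyRange 0 m).foldl
    (fun st i => if s[i.toNat]! && bDigitsOdd i then (st.1 + 1, i) else st) (0, 0)

-- 'while i < 99999999' upward search stepping by 2; fuel bounds the iterations
def bSearch : Nat → Int → Int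
  | 0, _ => 0
  | fuel + 1, i =>
      if i < 99999999 then
        if bDigitsOdd i && bIsPrimeOdd i then i else bSearch fuel (i + 2)
      else 0

def only_oddDigPrimes_alt (n : Int) : List Int :=
  let m : Int := if n > 0 then n else 0
  let st := bScan m (bSieve m)
  let i0 : Int := if PySem.Int.mod n 2 == 1 then n else n + 1
  let i1 : Int := if i0 < 3 then 3 else i0
  [st.1, st.2, bSearch (99999999 - i1).toNat i1]

-- ===== PRECONDITION & SPEC =====
-- Pre_ excludes n < 0, on which A raises ValueError (math.sqrt of the first negative
-- odd index reached by its upward search).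
def Pre_only_oddDigPrimes (n : Int) : Prop := 0 ≤ n
instance (n : Int) : Decidable (Pre_only_oddDigPrimes n) := by unfold Pre_only_oddDigPrimes; infer_instance
def pvWitness_only_oddDigPrimes : Int := 5


-- For n in {0,1} A returns [0,0,1]: its divisor-count test classifies 1 (whose only counted
-- divisor is 1) as prime, so the upward search stops at 1; B returns [0,0,3], the nearest
-- genuine all-odd-digit prime, which is the intended value since 1 is not prime.
def D_only_oddDigPrimes (n : Int) : Prop := 0 ≤ n ∧ n ≤ 1
instance (n : Int) : Decidable (D_only_oddDigPrimes n) := by unfold D_only_oddDigPrimes; infer_instance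

def Spec_only_oddDigPrimes (n : Int) (out : List Int) : Prop :=
  ¬ D_only_oddDigPrimes n → out = only_oddDigPrimes_alt n
instance (n : Int) (out : List Int) : Decidable (Spec_only_oddDigPrimes n out) := by
  unfold Spec_only_oddDigPrimes; infer_instance

def pvDiffWitness_only_oddDigPrimes : Int := 0
def pvDiffWitnessOut_only_oddDigPrimes : (List Int) × (List Int) := ([0, 0, 1], [0, 0, 3])

-- ===== CLAIM (what is proved, stated in full; the proofs are below) =====
def Claim_unchanged_only_oddDigPrimes : Prop :=
  ∀ (n : Int), Dom_only_oddDigPrimes n → Pre_only_oddDigPrimes n →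
    Spec_only_oddDigPrimes n (only_oddDigPrimes n)
def Claim_changed_only_oddDigPrimes : Prop :=
  Dom_only_oddDigPrimes (pvDiffWitness_only_oddDigPrimes) ∧
  Pre_only_oddDigPrimes (pvDiffWitness_only_oddDigPrimes) ∧
  D_only_oddDigPrimes (pvDiffWitness_only_oddDigPrimes) ∧
  only_oddDigPrimes (pvDiffWitness_only_oddDigPrimes) = pvDiffWitnessOut_only_oddDigPrimes.1 ∧
  only_oddDigPrimes_alt (pvDiffWitness_only_oddDigPrimes) = pvDiffWitnessOut_only_oddDigPrimes.2 ∧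
  pvDiffWitnessOut_only_oddDigPrimes.1 ≠ pvDiffWitnessOut_only_oddDigPrimes.2
def Claim_exact_only_oddDigPrimes : Prop :=
  ∀ (n : Int), Dom_only_oddDigPrimes n → Pre_only_oddDigPrimes n → D_only_oddDigPrimes n →
    only_oddDigPrimes n ≠ only_oddDigPrimes_alt n
-- ===== LEMMAS AND PROOFS =====

theorem pv_mod2_cases (x : Int) : PySem.Int.mod x 2 = 0 ∨ PySem.Int.mod x 2 = 1 := by
  have h := PySem.Int.mod_eq_emod_of_pos (a := x) (b := 2) (by norm_num)
  omega

theorem aDigitLoop_eq (cs : List Char) (f : Int) :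
    aDigitLoop cs f =
      if cs.all (fun c => PySem.Int.mod ((c.toNat : Int) - 48) 2 == 1) then f else 0 := by
  induction cs generalizing f with
  | nil => rfl
  | cons c cs ih =>
    rw [aDigitLoop, List.all_cons]
    rcases pv_mod2_cases ((c.toNat : Int) - 48) with h | h
    · rw [h]; simp
    · rw [h, ih]; simp

theorem aCount_lt_iff (i : Int) (h2 : 2 ≤ i) :
    aCountFactors i < 2 ↔ Nat.Prime i.toNat := by
  have hiN : (i.toNat : Int) = i := Int.toNat_of_nonneg (by omega)
  have hs1 : 1 ≤ Nat.sqrt i.toNat := Nat.le_sqrt.mpr (by omega)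
  have hs1' : (1 : Int) ≤ aSqrtInt i := by unfold aSqrtInt; exact_mod_cast hs1
  have hcons : PySem.List.pyRange 1 (aSqrtInt i + 1) =
      1 :: PySem.List.pyRange 2 (aSqrtInt i + 1) := by
    have h := PySem.List.pyRange_one_cons (a := 1) (b := aSqrtInt i + 1) (by omega)
    simpa using h
  have hcount : aCountFactors i =
      ((1 :: PySem.List.pyRange 2 (aSqrtInt i + 1)).countP
        (fun e => PySem.Int.mod i e == 0) : Int) := by
    unfold aCountFactors
    rw [PySem.List.foldl_if_add_one, hcons]
    simp
  rw [hcount, List.countP_cons_of_pos (pa := by simp)]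
  have key : ((PySem.List.pyRange 2 (aSqrtInt i + 1)).countP
      (fun e => PySem.Int.mod i e == 0)) = 0 ↔ Nat.Prime i.toNat := by
    rw [List.countP_eq_zero]
    constructor
    · intro h
      rw [Nat.prime_def_le_sqrt]
      refine ⟨by omega, ?_⟩
      intro m hm2 hms hdvd
      have hmem : (m : Int) ∈ PySem.List.pyRange 2 (aSqrtInt i + 1) := by
        rw [PySem.List.mem_pyRange_one]
        refine ⟨by exact_mod_cast hm2, ?_⟩
        unfold aSqrtInt; omega
      have hc := h _ hmem
      simp only [beq_iff_eq, PySem.Int.mod_eq_zero_iff_dvd] at hc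
      exact hc (by rw [← hiN]; exact_mod_cast hdvd)
    · intro hp e hmem
      rw [PySem.List.mem_pyRange_one] at hmem
      simp only [beq_iff_eq, PySem.Int.mod_eq_zero_iff_dvd]
      intro hdvd
      have he2 : 2 ≤ e := hmem.1
      have hes : e ≤ aSqrtInt i := by omega
      have heN : (e.toNat : Int) = e := Int.toNat_of_nonneg (by omega)
      have hdvdN : e.toNat ∣ i.toNat := by
        rw [← Int.natCast_dvd_natCast]
        rw [heN, hiN]; exact hdvd
      have hesN : e.toNat ≤ Nat.sqrt i.toNat := by
        have : (e.toNat : Int) ≤ (Nat.sqrt i.toNat : Int) := by rw [heN]; exact hes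
        exact_mod_cast this
      have he2N : 2 ≤ e.toNat := by omega
      exact (Nat.prime_def_le_sqrt.mp hp).2 e.toNat he2N hesN hdvdN
  constructor
  · intro h
    apply key.mp
    omega
  · intro h
    have := key.mpr h
    omega

theorem bTrial_iff (f : Nat) (i d : Int) (hd : 0 ≤ d)
    (hf : i < (d + 2 * f) * (d + 2 * f)) :
    bTrial f i d = true ↔ ∀ k : Nat, (d + 2 * k) * (d + 2 * k) ≤ i → ¬ (d + 2 * k) ∣ i := by
  have vac : ∀ (d : Int), 0 ≤ d → i < d * d →
      ∀ k : Nat, ¬ ((d + 2 * k) * (d + 2 * k) ≤ i) := by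
    intro d hd hlt k hk
    have hk0 : (0:Int) ≤ 2 * k := by positivity
    nlinarith
  induction f generalizing d with
  | zero =>
    simp only [bTrial, true_iff]
    push_cast at hf
    intro k hk
    exact absurd hk (vac d hd (by simpa using hf) k)
  | succ f ih =>
    rw [show bTrial (f + 1) i d =
        (if d * d ≤ i then
          if PySem.Int.mod i d == 0 then false else bTrial f i (d + 2)
        else true) from rfl]
    by_cases hdd : d * d ≤ i
    · rw [if_pos hdd]
      by_cases hm : PySem.Int.mod i d = 0
      · have hdvd : d ∣ i := (PySem.Int.mod_eq_zero_iff_dvd i d).mp hm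
        simp only [hm, beq_self_eq_true, if_true]
        constructor
        · intro h; exact absurd h (by simp)
        · intro h
          exfalso
          exact h 0 (by simpa using hdd) (by simpa using hdvd)
      · rw [if_neg (by simpa using hm)]
        have hnd : ¬ d ∣ i := fun hdvd => hm ((PySem.Int.mod_eq_zero_iff_dvd i d).mpr hdvd)
        have hfx : i < ((d + 2) + 2 * (f:Int)) * ((d + 2) + 2 * f) := by
          push_cast at hf
          nlinarith
        have hd2 : (0:Int) ≤ d + 2 := by omega
        refine (ih (d + 2) hd2 hfx).trans ?_
        constructor
        · intro h k hk
          rcases k with _ | k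
          · simpa using hnd
          · have e : d + 2 * ((k:Int) + 1) = (d + 2) + 2 * k := by ring
            push_cast at hk ⊢
            rw [e] at hk ⊢
            exact h k hk
        · intro h k hk
          have e : (d + 2) + 2 * (k:Int) = d + 2 * ((k:Int) + 1) := by ring
          rw [e] at hk ⊢
          have := h (k + 1)
          push_cast at this
          exact this hk
    · rw [if_neg hdd]
      simp only [true_iff]
      intro k hk
      exact absurd hk (vac d hd (by omega) k)

theorem bIsPrimeOdd_iff (i : Int) (h3 : 3 ≤ i) (hodd : i % 2 = 1) :
    bIsPrimeOdd i = decide (Nat.Prime i.toNat) := by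
  have hiN : (i.toNat : Int) = i := Int.toNat_of_nonneg (by omega)
  unfold bIsPrimeOdd
  rw [if_neg (by omega)]
  have hfuel : i < ((3:Int) + 2 * (i.toNat : Int)) * (3 + 2 * (i.toNat : Int)) := by
    nlinarith [hiN]
  by_cases hp : Nat.Prime i.toNat
  · simp only [hp, decide_true]
    rw [bTrial_iff i.toNat i 3 (by omega) hfuel]
    intro k hk hdvd
    have hk3 : (0:Int) ≤ 3 + 2 * (k:Int) := by positivity
    have hdvdN : ((3:Int) + 2 * (k:Int)).toNat ∣ i.toNat := by
      rw [← Int.natCast_dvd_natCast, Int.toNat_of_nonneg hk3, hiN]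
      exact hdvd
    rcases Nat.Prime.eq_one_or_self_of_dvd hp _ hdvdN with h1 | hself
    · omega
    · have hc : ((3:Int) + 2 * (k:Int)) = i := by
        rw [← Int.toNat_of_nonneg hk3, hself, hiN]
      rw [hc] at hk
      nlinarith
  · simp only [hp, decide_false]
    rw [← Bool.not_eq_true]
    rw [bTrial_iff i.toNat i 3 (by omega) hfuel]
    intro hall
    set m := (i.toNat).minFac with hm
    have hne1 : i.toNat ≠ 1 := by omega
    have hmp : Nat.Prime m := Nat.minFac_prime hne1
    have hmdvd : m ∣ i.toNat := Nat.minFac_dvd _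
    have hmsq : m ^ 2 ≤ i.toNat := Nat.minFac_sq_le_self (by omega) hp
    have hm2 : m ≠ 2 := by
      intro h2
      have : (2:Nat) ∣ i.toNat := by rw [← h2]; exact hmdvd
      omega
    have hmodd : m % 2 = 1 := by
      rcases Nat.Prime.eq_two_or_odd hmp with h | h
      · exact absurd h hm2
      · exact h
    have hm3 : 3 ≤ m := by
      have := hmp.two_le
      omega
    have hk : m = 3 + 2 * ((m - 3) / 2) := by omega
    have c1 : (3 : Int) + 2 * (((m - 3) / 2 : Nat) : Int) = (m : Int) := by
      have hc := congrArg (fun t : Nat => (t : Int)) hk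
      push_cast at hc
      omega
    have H := hall ((m - 3) / 2)
    rw [c1] at H
    apply H
    · rw [← hiN]
      exact_mod_cast (by nlinarith [hmsq] : m * m ≤ i.toNat)
    · rw [← hiN]
      exact_mod_cast hmdvd

theorem size_foldl_set (l : List Int) (s : Array Bool) :
    (l.foldl (fun s q => s.set! q.toNat false) s).size = s.size := by
  induction l generalizing s with
  | nil => rfl
  | cons q l ih => rw [List.foldl_cons, ih, Array.size_set!]

theorem get_foldl_set (l : List Int) (s : Array Bool) (j : Nat) (hj : j < s.size) :
    (l.foldl (fun s q => s.set! q.toNat false) s)[j]! =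
      (s[j]! && !(l.any (fun q => q.toNat == j))) := by
  induction l generalizing s with
  | nil => simp
  | cons q l ih =>
    rw [List.foldl_cons, ih _ (by rw [Array.size_set!]; exact hj), List.any_cons]
    have hset : (s.set! q.toNat false)[j]! = (s[j]! && !(q.toNat == j)) := by
      rw [getElem!_pos (s.set! q.toNat false) j (by rw [Array.size_set!]; exact hj),
          getElem!_pos s j hj]
      simp only [Array.set!]
      rw [Array.getElem_setIfInBounds hj]
      by_cases h : q.toNat = j <;> simp [h]
    rw [hset]
    cases (q.toNat == j) <;> cases s[j]! <;> simp

theorem size_bMark (m : Int) (s : Array Bool) (p : Int) : (bMark m s p).size = s.size :=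
  size_foldl_set _ s


theorem bMark_get (m p : Int) (s : Array Bool) (j : Nat)
    (hj : j < s.size) (hp : 2 ≤ p) :
    (bMark m s p)[j]! =
      (s[j]! && !(decide (p ∣ (j:Int) ∧ 2 * p ≤ (j:Int) ∧ (j:Int) < m))) := by
  rw [bMark, get_foldl_set _ s j hj]
  have hany : (PySem.List.pyRange (2*p) m p).any (fun q => q.toNat == j)
      = decide (p ∣ (j:Int) ∧ 2 * p ≤ (j:Int) ∧ (j:Int) < m) := by
    rw [Bool.eq_iff_iff]
    simp only [List.any_eq_true, decide_eq_true_eq, beq_iff_eq]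
    have hp2 : p ∣ 2 * p := dvd_mul_left p 2
    constructor
    · rintro ⟨q, hqmem, hqj⟩
      rw [PySem.List.mem_pyRange_iff_of_pos (by omega)] at hqmem
      obtain ⟨h1, h2, h3⟩ := hqmem
      have hqj' : q = (j:Int) := by omega
      subst hqj'
      refine ⟨?_, by omega, by omega⟩
      have := dvd_add h3 hp2
      simpa using this
    · rintro ⟨hdvd, h1, h2⟩
      refine ⟨(j:Int), ?_, by simp⟩
      rw [PySem.List.mem_pyRange_iff_of_pos (by omega)]
      exact ⟨h1, h2, dvd_sub hdvd hp2⟩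
  rw [hany]

theorem get_foldl_bMark (ps : List Int) (m : Int) (s : Array Bool) (j : Nat)
    (hj : j < s.size) (hps : ∀ p ∈ ps, 2 ≤ p) :
    (ps.foldl (bMark m) s)[j]! =
      (s[j]! && !(ps.any (fun p => decide (p ∣ (j:Int) ∧ 2 * p ≤ (j:Int) ∧ (j:Int) < m)))) := by
  induction ps generalizing s with
  | nil => simp
  | cons p ps ih =>
    rw [List.foldl_cons,
        ih (bMark m s p) (by rw [size_bMark]; exact hj) (fun q hq => hps q (List.mem_cons_of_mem _ hq)),
        bMark_get m p s j hj (hps p (List.mem_cons_self ..)), List.any_cons]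
    cases (decide (p ∣ (j:Int) ∧ 2 * p ≤ (j:Int) ∧ (j:Int) < m)) <;> cases s[j]! <;> simp

theorem bSieve_get (m : Int) (j : Nat) (hj : j < m.toNat) :
    (bSieve m)[j]! = decide (Nat.Prime j) := by
  have hjm : (j:Int) < m := by omega
  unfold bSieve
  set s1 := Array.replicate m.toNat true with hs1
  have hsz1 : s1.size = m.toNat := Array.size_replicate
  set s2 := (PySem.List.pyRange 0 (min m 2)).foldl (fun s i => s.set! i.toNat false) s1 with hs2
  have hsz2 : s2.size = m.toNat := by rw [hs2, size_foldl_set, hsz1]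
  rw [get_foldl_bMark _ _ _ j (by rw [hsz2]; exact hj)
      (fun p hp => by rw [PySem.List.mem_pyRange_one] at hp; omega)]
  have hg2 : s2[j]! = decide (2 ≤ j) := by
    rw [hs2, get_foldl_set _ _ j (by rw [hsz1]; exact hj)]
    have hrep : s1[j]! = true := by
      rw [getElem!_pos s1 j (by rw [hsz1]; exact hj)]
      exact Array.getElem_replicate _
    rw [hrep, Bool.true_and]
    have hany : ((PySem.List.pyRange 0 (min m 2)).any fun q => q.toNat == j)
        = decide ((j:Nat) < 2) := by
      rw [Bool.eq_iff_iff]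
      simp only [List.any_eq_true, PySem.List.mem_pyRange_one, beq_iff_eq, decide_eq_true_eq]
      constructor
      · rintro ⟨q, ⟨hq0, hq2⟩, hqj⟩
        omega
      · intro h2
        exact ⟨(j:Int), ⟨by omega, by omega⟩, by omega⟩
    rw [hany, Bool.eq_iff_iff]
    simp only [Bool.not_eq_true', decide_eq_false_iff_not, decide_eq_true_eq]
    omega
  rw [hg2, Bool.eq_iff_iff]
  simp only [Bool.and_eq_true, decide_eq_true_eq, Bool.not_eq_true', List.any_eq_false]
  constructor
  · rintro ⟨h2, hall⟩
    rw [Nat.prime_def_lt]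
    refine ⟨h2, fun d hdlt hdvd => ?_⟩
    by_contra hd1
    have hd0 : d ≠ 0 := by
      intro h0
      rw [h0] at hdvd
      have := Nat.eq_zero_of_zero_dvd hdvd
      omega
    obtain ⟨k, hk⟩ := hdvd
    have hk2 : 2 ≤ k := by
      rcases Nat.lt_or_ge k 2 with h | h
      · interval_cases k <;> omega
      · exact h
    have h2d : 2 * d ≤ j := by
      calc 2 * d ≤ k * d := by
            have := Nat.mul_le_mul_right d hk2
            omega
        _ = j := by rw [hk]; ring
    exact hall (d:Int)
      (by rw [PySem.List.mem_pyRange_one]; constructor <;> omega)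
      ⟨Int.natCast_dvd_natCast.mpr ⟨k, hk⟩, by omega, hjm⟩
  · intro hp
    refine ⟨hp.two_le, fun p hpmem ⟨hdvd, h2p, _⟩ => ?_⟩
    rw [PySem.List.mem_pyRange_one] at hpmem
    have hpN : p.toNat ∣ j := by
      rw [← Int.natCast_dvd_natCast, Int.toNat_of_nonneg (by omega)]
      exact hdvd
    rcases hp.eq_one_or_self_of_dvd _ hpN with h1 | hself
    · omega
    · omega


-- A's combined per-element test
theorem aIsPure_eq (i : Int) :
    aIsPure i = (decide (aCountFactors i < 2) && bDigitsOdd i) := by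
  unfold aIsPure bDigitsOdd
  rw [aDigitLoop_eq]
  cases hall : (PySem.Int.toStr i).toList.all
      (fun c => PySem.Int.mod ((c.toNat : Int) - 48) 2 == 1)
  · simp
  · simp only [if_true, Bool.and_true]
    by_cases hc : aCountFactors i < 2 <;> simp [hc]

-- the canonical per-element predicate both counting loops filter by
def purePred (i : Int) : Bool := decide (Nat.Prime i.toNat) && bDigitsOdd i

theorem purePred_shape (i : Int) (h0 : 0 ≤ i) (hP : purePred i = true) :
    3 ≤ i ∧ i % 2 = 1 := by
  unfold purePred at hP
  rw [Bool.and_eq_true, decide_eq_true_eq] at hP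
  obtain ⟨hp, hd⟩ := hP
  have h2 : 2 ≤ i.toNat := hp.two_le
  have hne2 : i ≠ 2 := by
    intro h2'
    subst h2'
    exact absurd hd (by decide)
  have hodd : i.toNat % 2 = 1 := by
    rcases hp.eq_two_or_odd with h | h
    · omega
    · exact h
  omega

-- splitting the step-2 range at the top
theorem pyRange_two_succ_right (m : Nat) :
    PySem.List.pyRange 3 ((m : Int) + 1) 2 =
      PySem.List.pyRange 3 (m : Int) 2 ++
        (if 3 ≤ m ∧ m % 2 = 1 then [(m : Int)] else []) := by
  rw [PySem.List.pyRange_of_pos 3 ((m:Int)+1) (by norm_num),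
      PySem.List.pyRange_of_pos 3 (m:Int) (by norm_num)]
  by_cases h3 : 3 ≤ m
  · rw [if_pos (by omega : (3:Int) < (m:Int)+1)]
    by_cases h4 : 4 ≤ m
    · rw [if_pos (by omega : (3:Int) < (m:Int))]
      by_cases hodd : m % 2 = 1
      · rw [if_pos ⟨h3, hodd⟩]
        rw [show (((m:Int) + 1 - 3 + 2 - 1) / 2).toNat
              = (((m:Int) - 3 + 2 - 1) / 2).toNat + 1 from by omega]
        rw [List.range_succ, List.map_append]
        congr 1
        simp only [List.map_cons, List.map_nil, List.cons.injEq, and_true]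
        omega
      · rw [if_neg (by tauto), List.append_nil]
        rw [show (((m:Int) + 1 - 3 + 2 - 1) / 2).toNat
              = (((m:Int) - 3 + 2 - 1) / 2).toNat from by omega]
    · have hm : m = 3 := by omega
      subst hm
      norm_num
  · rw [if_neg (by omega : ¬ (3:Int) < (m:Int)+1),
        if_neg (by omega : ¬ (3:Int) < (m:Int)), if_neg (by omega)]
    simp

-- the two counting loops filter the same elements
theorem filters_eq (M : Nat) :
    (PySem.List.pyRange 3 (M:Int) 2).filter purePred
      = (PySem.List.pyRange 0 (M:Int)).filter purePred := by
  induction M with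
  | zero =>
    rw [Nat.cast_zero, PySem.List.pyRange_of_pos 3 0 (by norm_num), if_neg (by norm_num)]
    rw [PySem.List.pyRange_one_eq_nil (by norm_num)]
    simp
  | succ M ih =>
    rw [show ((M + 1 : Nat) : Int) = (M:Int) + 1 from by push_cast; ring]
    rw [pyRange_two_succ_right, PySem.List.pyRange_one_succ_right (by positivity)]
    rw [List.filter_append, List.filter_append, ih]
    congr 1
    cases hP : purePred (M:Int)
    · by_cases hc : 3 ≤ M ∧ M % 2 = 1 <;> simp [hc, hP]
    · have := purePred_shape (M:Int) (by positivity) hP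
      rw [if_pos (by omega)]

-- the counting loops agree
theorem loop1_eq (n : Int) (h : 0 ≤ n) :
    aLoop1 n = bScan n (bSieve n) := by
  obtain ⟨M, rfl⟩ := Int.eq_ofNat_of_zero_le h
  unfold aLoop1 bScan
  rw [PySem.List.foldl_congr_mem _ _
      (fun (s : Int × Int) i => if purePred i then (s.1 + 1, i) else s) _
      (fun acc i hmem => by
        rw [PySem.List.mem_pyRange_iff_of_pos (s := 2) (by norm_num)] at hmem
        have h3 : 3 ≤ i := hmem.1
        have he : aIsPure i = purePred i := by
          rw [aIsPure_eq]
          unfold purePred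
          rw [decide_eq_decide.mpr (aCount_lt_iff i (by omega))]
        simp only [he])]
  rw [PySem.List.foldl_congr_mem (PySem.List.pyRange 0 (M:Int))
      (fun (st : Int × Int) i =>
        if (bSieve (M:Int))[i.toNat]! && bDigitsOdd i then (st.1 + 1, i) else st)
      (fun (st : Int × Int) i => if purePred i then (st.1 + 1, i) else st) (0, 0)
      (fun acc i hmem => by
        rw [PySem.List.mem_pyRange_one] at hmem
        have he : ((bSieve (M:Int))[i.toNat]! && bDigitsOdd i) = purePred i := by
          unfold purePred
          rw [bSieve_get (M:Int) i.toNat (by omega)]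
        simp only [he])]
  rw [PySem.List.foldl_if_eq_foldl_filter purePred
        (fun (s : Int × Int) i => (s.1 + 1, i)),
      PySem.List.foldl_if_eq_foldl_filter purePred
        (fun (s : Int × Int) i => (s.1 + 1, i))]
  rw [filters_eq M]

-- B's combined per-element test, for odd i ≥ 3, equals A's
theorem tests_eq (i : Int) (h3 : 3 ≤ i) (hodd : i % 2 = 1) :
    (bDigitsOdd i && bIsPrimeOdd i) = aIsPure i := by
  rw [aIsPure_eq, decide_eq_decide.mpr (aCount_lt_iff i (by omega)),
      bIsPrimeOdd_iff i h3 hodd, Bool.and_comm]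

theorem bSearch_succ (f : Nat) (i : Int) :
    bSearch (f + 1) i =
      if i < 99999999 then
        if bDigitsOdd i && bIsPrimeOdd i then i else bSearch f (i + 2)
      else 0 := rfl

theorem aLoop2_succ (f : Nat) (i : Int) :
    aLoop2 (f + 1) i =
      if PySem.Int.mod i 2 == 0 then aLoop2 f (i + 1)
      else if aIsPure i then i else aLoop2 f (i + 1) := rfl

-- fuel invariance of B's search
theorem bSearch_fuel (f : Nat) : ∀ (g : Nat) (i : Int),
    (99999999 - i).toNat ≤ 2 * f → (99999999 - i).toNat ≤ 2 * g →
    bSearch f i = bSearch g i := by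
  induction f with
  | zero =>
    intro g i hf hg
    have hi : (99999999:Int) ≤ i := by omega
    cases g with
    | zero => rfl
    | succ g => rw [bSearch_succ, if_neg (by omega)]; rfl
  | succ f ih =>
    intro g i hf hg
    by_cases hi : i < 99999999
    · cases g with
      | zero => omega
      | succ g =>
        rw [bSearch_succ, bSearch_succ, if_pos hi, if_pos hi]
        cases hP : (bDigitsOdd i && bIsPrimeOdd i)
        · simp only [Bool.false_eq_true, if_false]
          exact ih g (i + 2) (by omega) (by omega)
        · rfl
    · cases g with
      | zero => rw [bSearch_succ, if_neg hi]; rfl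
      | succ g => rw [bSearch_succ, bSearch_succ, if_neg hi, if_neg hi]

-- the upward searches agree from any odd i ≥ 3
theorem search_eq (t : Nat) : ∀ (i : Int), 3 ≤ i → i % 2 = 1 →
    t = (99999999 - i).toNat → aLoop2 t i = bSearch t i := by
  induction t using Nat.strong_induction_on with
  | _ t ih =>
    intro i h3 hodd ht
    cases t with
    | zero => rfl
    | succ s =>
      have hi : i < 99999999 := by omega
      have hmod : PySem.Int.mod i 2 = 1 := by
        rw [PySem.Int.mod_eq_emod_of_pos (by norm_num)]; exact hodd
      rw [aLoop2_succ, bSearch_succ, if_pos hi, if_neg (by rw [hmod]; decide)]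
      rw [← tests_eq i h3 hodd]
      cases hP : (bDigitsOdd i && bIsPrimeOdd i)
      · simp only [Bool.false_eq_true, if_false]
        -- A skips the even i+1, B steps to i+2
        have hs1 : 1 ≤ s := by omega
        obtain ⟨s', rfl⟩ : ∃ s'', s = s'' + 1 := ⟨s - 1, by omega⟩
        have hB : bSearch (s' + 1) (i + 2) = bSearch s' (i + 2) := by
          apply bSearch_fuel <;> omega
        rw [aLoop2_succ, if_pos (by
          rw [PySem.Int.mod_eq_emod_of_pos (by norm_num)]
          simp only [beq_iff_eq]
          omega), hB]
        rw [show i + 1 + 1 = i + 2 from by ring]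
        exact ih s' (by omega) (i + 2) (by omega) (by omega) (by omega)
      · rfl

-- ===== VERDICT (by name: the statement is the Claim_ definition above) =====
theorem only_oddDigPrimes_spec : Claim_unchanged_only_oddDigPrimes := by
  intro n hdom hpre hnD
  unfold Pre_only_oddDigPrimes at hpre
  have h2 : 2 ≤ n := by
    unfold D_only_oddDigPrimes at hnD
    omega
  unfold Spec_only_oddDigPrimes at *
  unfold only_oddDigPrimes only_oddDigPrimes_alt
  rw [if_pos (by omega : n > 0)]
  rw [loop1_eq n (by omega)]
  simp only [List.cons.injEq, and_true, true_and]
  -- the upward search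
  by_cases hodd : PySem.Int.mod n 2 = 1
  · have h3 : 3 ≤ n := by
      have := PySem.Int.mod_eq_emod_of_pos (a := n) (b := 2) (by norm_num)
      omega
    have e0 : (if (PySem.Int.mod n 2 == 1) = true then n else n + 1) = n := by
      rw [hodd]; norm_num
    rw [e0, if_neg (by omega : ¬ n < 3)]
    exact search_eq _ n h3 (by
      rw [PySem.Int.mod_eq_emod_of_pos (by norm_num)] at hodd
      exact hodd) rfl
  · -- n even
    have hmod0 : PySem.Int.mod n 2 = 0 := by
      rcases pv_mod2_cases n with h | h
      · exact h
      · exact absurd h hodd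
    have e0 : (if (PySem.Int.mod n 2 == 1) = true then n else n + 1) = n + 1 := by
      rw [hmod0]; norm_num
    rw [e0, if_neg (by omega : ¬ n + 1 < 3)]
    have heven : n % 2 = 0 := by
      rw [PySem.Int.mod_eq_emod_of_pos (by norm_num)] at hmod0
      omega
    by_cases hbig : 99999999 ≤ n
    · rw [show (99999999 - n).toNat = 0 from by omega,
          show (99999999 - (n + 1)).toNat = 0 from by omega]
      rfl
    · obtain ⟨s, hs⟩ : ∃ s : Nat, (99999999 - n).toNat = s + 1 := by
        refine ⟨(99999999 - n).toNat - 1, by omega⟩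
      rw [hs, aLoop2_succ, if_pos (by rw [hmod0]; decide)]
      rw [show (99999999 - (n + 1)).toNat = s from by omega]
      exact search_eq s (n + 1) (by omega) (by omega) (by omega)

theorem only_oddDigPrimes_changed : Claim_changed_only_oddDigPrimes := by
  unfold Claim_changed_only_oddDigPrimes; decide

theorem only_oddDigPrimes_tight : Claim_exact_only_oddDigPrimes := by
  intro n _ _ hD
  have : n = 0 ∨ n = 1 := by unfold D_only_oddDigPrimes at hD; omega
  rcases this with rfl | rfl <;> decide
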